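-- pv_equiv track=rewrite | github.com/sanjanaurba/Mentorship-Matching-System | app.py | unmatch_least_compatible
-- ===== SOURCE A (Python) =====
-- def unmatch_least_compatible(total_score, preferences, in_discipline, discipline_type):
--     reverse_sorted_scores = sorted(total_score.items(), key=lambda x: x[1], reverse=True)
--
--     for applicant, score in reverse_sorted_scores:  # Obtain highest scoring mentor/mentee
--         if applicant in in_discipline:  # Check if the applicant is in the current discipline
--             is_first_choice = False
--
--             for other_applicant, pref in preferences.items():
--                 if len(pref) > 0 and pref[0] == applicant:  # Check if pref is not empty
--                     is_first_choice = True
--                     break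
--
--             if not is_first_choice:  # If not first choice in anyone's pref
--                 return applicant
--
--     return None  # If all are first choices
-- ===== SOURCE B (Python) =====
-- def unmatch_least_compatible(total_score, preferences, in_discipline, discipline_type):
--     first_choice = {pref[0] for pref in preferences.values() if pref}
--     best = None
--     for applicant, score in total_score.items():
--         if applicant in in_discipline and applicant not in first_choice:
--             if best is None or score > best[1]:
--                 best = (applicant, score)
--     return best[0] if best is not None else None
-- ===== Notes on version B (the rewrite author's own statement) =====
-- stated objective: simpler
-- what changed: Replaces A's descending sort plus per-candidate inner scan of all preferences by a first-choice set built once and a single running-max pass over total_score in insertion order.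
import Mathlib
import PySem

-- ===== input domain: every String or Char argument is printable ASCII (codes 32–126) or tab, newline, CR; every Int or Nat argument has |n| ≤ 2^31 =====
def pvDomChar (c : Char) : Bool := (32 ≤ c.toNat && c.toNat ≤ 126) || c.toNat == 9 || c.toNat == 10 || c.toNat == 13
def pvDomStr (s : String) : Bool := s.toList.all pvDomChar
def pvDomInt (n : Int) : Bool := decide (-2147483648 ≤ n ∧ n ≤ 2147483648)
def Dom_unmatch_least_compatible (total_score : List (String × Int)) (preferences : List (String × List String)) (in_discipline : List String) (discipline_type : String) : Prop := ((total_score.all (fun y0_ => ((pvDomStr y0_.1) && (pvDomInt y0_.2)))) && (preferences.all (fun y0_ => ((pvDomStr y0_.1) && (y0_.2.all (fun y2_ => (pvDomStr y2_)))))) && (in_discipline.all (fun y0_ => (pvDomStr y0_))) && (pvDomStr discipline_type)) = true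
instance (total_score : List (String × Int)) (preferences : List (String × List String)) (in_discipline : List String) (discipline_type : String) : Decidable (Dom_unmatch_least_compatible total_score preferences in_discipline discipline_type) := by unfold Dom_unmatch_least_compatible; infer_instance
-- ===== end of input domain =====

-- ===== PORT A =====
-- B replaces A's sort-then-scan (with an inner loop over preferences per candidate) by a
-- precomputed first-choice set and a single running-max pass; return values proved equal.

-- inner loop of A over preferences.items() with break
def pvIsFirstChoice (prefs : List (String × List String)) (applicant : String) : Bool :=
  match prefs with
  | [] => false
  | (_, pref) :: rest =>
    if 0 < pref.length ∧ PySem.List.pyGetD pref 0 "" = applicant then true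
    else pvIsFirstChoice rest applicant

-- A's outer loop over the reverse-sorted scores, returning at the first survivor
def pvScanA (scores : List (String × Int)) (prefs : List (String × List String)) (in_discipline : List String) : Option String :=
  match scores with
  | [] => none
  | (applicant, _score) :: rest =>
    if applicant ∈ in_discipline then
      if ¬ pvIsFirstChoice prefs applicant = true then some applicant
      else pvScanA rest prefs in_discipline
    else pvScanA rest prefs in_discipline

def unmatch_least_compatible (total_score : List (String × Int)) (preferences : List (String × List String)) (in_discipline : List String) (discipline_type : String) : Option String :=
  let reverse_sorted_scores := PySem.List.sorted (PySem.Dict.ofList total_score).items (fun x => x.2) true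
  pvScanA reverse_sorted_scores (PySem.Dict.ofList preferences).items in_discipline

-- ===== PORT B =====
-- first_choice = {pref[0] for pref in preferences.values() if pref}
def pvFirstChoiceSet (preferences : PySem.Dict String (List String)) : PySem.Set String :=
  PySem.Set.ofList (((preferences.values).filter (fun pref => 0 < pref.length)).map (fun pref => PySem.List.pyGetD pref 0 ""))

-- body of B's single for-loop: keep the best (first strictly-greater wins)
def pvBestStep (in_discipline : List String) (first_choice : PySem.Set String) (best : Option (String × Int)) (x : String × Int) : Option (String × Int) :=
  if x.1 ∈ in_discipline ∧ ¬ x.1 ∈ first_choice then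
    match best with
    | none => some x
    | some b => if b.2 < x.2 then some x else some b
  else best

def unmatch_least_compatible_alt (total_score : List (String × Int)) (preferences : List (String × List String)) (in_discipline : List String) (discipline_type : String) : Option String :=
  let first_choice := pvFirstChoiceSet (PySem.Dict.ofList preferences)
  (((PySem.Dict.ofList total_score).items).foldl (pvBestStep in_discipline first_choice) none).map (fun b => b.1)

-- ===== PRECONDITION & SPEC =====
def Spec_unmatch_least_compatible (total_score : List (String × Int)) (preferences : List (String × List String)) (in_discipline : List String) (discipline_type : String) (out : Option String) : Prop := out = unmatch_least_compatible_alt total_score preferences in_discipline discipline_type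
instance (total_score : List (String × Int)) (preferences : List (String × List String)) (in_discipline : List String) (discipline_type : String) (out : Option String) : Decidable (Spec_unmatch_least_compatible total_score preferences in_discipline discipline_type out) := by unfold Spec_unmatch_least_compatible; infer_instance

-- ===== CLAIM (what is proved, stated in full; the proofs are below) =====
def Claim_equal_unmatch_least_compatible : Prop := ∀ (total_score : List (String × Int)) (preferences : List (String × List String)) (in_discipline : List String) (discipline_type : String), Dom_unmatch_least_compatible total_score preferences in_discipline discipline_type → Spec_unmatch_least_compatible total_score preferences in_discipline discipline_type (unmatch_least_compatible total_score preferences in_discipline discipline_type)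

-- ===== LEMMAS AND PROOFS =====

-- generic version of B's loop body, with the whole candidate test as one predicate p
def pvGStep (p : String × Int → Bool) (best : Option (String × Int)) (x : String × Int) : Option (String × Int) :=
  if p x then
    match best with
    | none => some x
    | some b => if b.2 < x.2 then some x else some b
  else best

-- A's scan is find? of the candidate predicate, projected to the name
lemma pvScanA_eq_find? (scores : List (String × Int)) (prefs : List (String × List String)) (ind : List String) :
    pvScanA scores prefs ind =
      (scores.find? (fun v => decide (v.1 ∈ ind) && !pvIsFirstChoice prefs v.1)).map (fun b => b.1) := by
  induction scores with
  | nil => rfl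
  | cons hd tl ih =>
    obtain ⟨a, s⟩ := hd
    by_cases hmem : a ∈ ind <;> by_cases hfc : pvIsFirstChoice prefs a = true <;>
      simp [pvScanA, List.find?, hmem, hfc, ih]

-- membership in B's first_choice set = A's inner loop
lemma pvFirstChoice_mem (prefs : List (String × List String)) (a : String) :
    (a ∈ pvFirstChoiceSet (PySem.Dict.mk prefs)) ↔ pvIsFirstChoice prefs a = true := by
  simp only [pvFirstChoiceSet, PySem.Set.mem_ofList, PySem.Dict.values]
  induction prefs with
  | nil => simp [pvIsFirstChoice]
  | cons hd tl ih =>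
    obtain ⟨k, pref⟩ := hd
    simp only [List.map_cons, List.filter_cons]
    by_cases hlen : 0 < pref.length
    · simp only [hlen, decide_true, if_true, List.map_cons, List.mem_cons, pvIsFirstChoice]
      by_cases heq : PySem.List.pyGetD pref 0 "" = a
      · simp [heq]
      · have hne : ¬ a = PySem.List.pyGetD pref 0 "" := fun h => heq h.symm
        simp [hne, ih]
        exact fun h => absurd h heq
    · simp [pvIsFirstChoice, hlen, ih]

-- key step: on a score-nonincreasing list, inserting x (stably, descending) and taking the
-- first candidate equals updating the running best with x
lemma pvFind_insertBy (p : String × Int → Bool) (x : String × Int) (s : List (String × Int))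
    (hs : s.Pairwise (fun u v => v.2 ≤ u.2)) :
    (PySem.List.insertBy (fun a b => decide (b.2 < a.2)) x s).find? p = pvGStep p (s.find? p) x := by
  induction s with
  | nil =>
    by_cases hp : p x = true <;> simp [PySem.List.insertBy, pvGStep, List.find?, hp]
  | cons y t ih =>
    rw [List.pairwise_cons] at hs
    obtain ⟨hy, ht⟩ := hs
    by_cases hlt : y.2 < x.2
    · -- x goes in front
      by_cases hp : p x = true
      · rcases hfind : (y :: t).find? p with _ | b
        · simp [PySem.List.insertBy, hlt, hp, pvGStep]
        · have hb : b ∈ y :: t := List.mem_of_find?_eq_some hfind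
          have hble : b.2 ≤ y.2 := by
            rcases List.mem_cons.mp hb with h | h
            · exact le_of_eq (by rw [h])
            · exact hy b h
          have : b.2 < x.2 := lt_of_le_of_lt hble hlt
          simp [PySem.List.insertBy, hlt, hp, pvGStep, this]
      · simp [PySem.List.insertBy, hlt, List.find?, hp, pvGStep]
    · -- x goes after y
      by_cases hpy : p y = true
      · have hxle : x.2 ≤ y.2 := le_of_not_gt hlt
        by_cases hp : p x = true
        · simp [PySem.List.insertBy, hlt, List.find?, hpy, pvGStep, hp]
        · simp [PySem.List.insertBy, hlt, List.find?, hpy, pvGStep, hp]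
      · simp [PySem.List.insertBy, hlt, List.find?, hpy, pvGStep, ih ht]

-- the stable descending sort followed by find-first = the single running-max pass
lemma pvFind_sorted_eq_foldl (p : String × Int → Bool) (xs : List (String × Int)) :
    (PySem.List.sorted xs (fun v => v.2) true).find? p = xs.foldl (pvGStep p) none := by
  induction xs using List.reverseRecOn with
  | nil => rfl
  | append_singleton xs x ih =>
    have hrep := PySem.List.sorted_rev_eq_foldl_insertBy (xs ++ [x]) (fun v : String × Int => v.2)
    rw [List.foldl_append] at hrep ⊢
    rw [hrep, List.foldl_cons, List.foldl_nil,
        ← PySem.List.sorted_rev_eq_foldl_insertBy xs (fun v : String × Int => v.2),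
        pvFind_insertBy p x _ (PySem.List.sorted_pairwise_rev xs (fun v => v.2)), ih]
    rfl

-- B's concrete loop body is the generic step at B's candidate predicate
lemma pvBestStep_eq_gstep (ind : List String) (fc : PySem.Set String) :
    pvBestStep ind fc = pvGStep (fun v => decide (v.1 ∈ ind) && !decide (v.1 ∈ fc)) := by
  funext best x
  by_cases h1 : x.1 ∈ ind <;> by_cases h2 : x.1 ∈ fc <;>
    simp [pvBestStep, pvGStep, h1, h2]

-- ===== VERDICT (by name: the statement is the Claim_ definition above) =====
theorem unmatch_least_compatible_spec : Claim_equal_unmatch_least_compatible := by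
  intro total_score preferences in_discipline discipline_type _hdom
  unfold Spec_unmatch_least_compatible
  simp only [unmatch_least_compatible, unmatch_least_compatible_alt]
  rw [pvScanA_eq_find?, pvBestStep_eq_gstep, ← pvFind_sorted_eq_foldl]
  have hpred : (fun v : String × Int => decide (v.1 ∈ in_discipline) && !pvIsFirstChoice (PySem.Dict.ofList preferences).items v.1)
      = (fun v : String × Int => decide (v.1 ∈ in_discipline) && !decide (v.1 ∈ pvFirstChoiceSet (PySem.Dict.ofList preferences))) := by
    funext v
    have hfc := pvFirstChoice_mem (PySem.Dict.ofList preferences).items v.1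
    by_cases h : pvIsFirstChoice (PySem.Dict.ofList preferences).items v.1 = true <;> simp_all
  rw [hpred]
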